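-- pv_equiv track=rewrite | github.com/cagingulsen/advent-of-code-2019 | day1/solution.py | calculate_consumption_realistic
-- ===== SOURCE A (Python) =====
-- def calculate_consumption_realistic(mass):
--     total_fuel = 0
--     fuel_needed = mass
--
--     while True:
--         fuel_needed = int(fuel_needed/3) - 2
--
--         if fuel_needed <= 0:
--             break
--
--         total_fuel = total_fuel + fuel_needed
--
--     return total_fuel
-- ===== SOURCE B (Python) =====
-- def calculate_consumption_realistic(mass):
--     fuel = mass // 3 - 2
--     if fuel <= 0:
--         return 0
--     return fuel + calculate_consumption_realistic(fuel)
-- ===== Notes on version B (the rewrite author's own statement) =====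
-- stated objective: simpler
-- what changed: Replaced the accumulator-plus-while(True)-loop using int(x/3) truncation with a direct recursion on the diminishing fuel mass using floor division; the divisions agree wherever the computed fuel is positive, so the values coincide.
import Mathlib
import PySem

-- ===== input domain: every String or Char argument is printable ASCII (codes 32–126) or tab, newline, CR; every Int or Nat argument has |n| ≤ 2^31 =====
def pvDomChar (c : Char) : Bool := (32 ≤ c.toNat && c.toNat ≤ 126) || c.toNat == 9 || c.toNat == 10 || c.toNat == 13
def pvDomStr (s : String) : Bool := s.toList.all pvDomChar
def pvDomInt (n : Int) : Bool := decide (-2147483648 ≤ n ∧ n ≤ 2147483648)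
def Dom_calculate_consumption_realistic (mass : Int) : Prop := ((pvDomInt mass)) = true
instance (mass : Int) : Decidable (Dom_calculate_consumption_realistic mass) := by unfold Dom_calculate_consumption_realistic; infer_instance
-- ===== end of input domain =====

-- B replaces A's accumulator-plus-while-loop with the direct recurrence on the diminishing fuel mass (simpler decomposition, same values).

-- termination helper for both ports: a positive next fuel value is strictly smaller than the mass it came from
theorem pvFuelTdiv_lt (x : Int) (h : 0 < PySem.Int.truncdiv x 3 - 2) :
    (PySem.Int.truncdiv x 3 - 2).toNat < x.toNat := by
  unfold PySem.Int.truncdiv at *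
  rcases (by omega : x ≤ 0 ∨ 0 < x) with hx | hx
  · exfalso
    have h1 : x.tdiv 3 = -((-x).tdiv 3) := by rw [Int.neg_tdiv, neg_neg]
    have h2 : (-x).tdiv 3 = (-x) / 3 := Int.tdiv_eq_ediv_of_nonneg (by omega)
    omega
  · have h2 : x.tdiv 3 = x / 3 := Int.tdiv_eq_ediv_of_nonneg (by omega)
    omega

theorem pvFuelFloordiv_lt (x : Int) (h : 0 < PySem.Int.floordiv x 3 - 2) :
    (PySem.Int.floordiv x 3 - 2).toNat < x.toNat := by
  have h2 : PySem.Int.floordiv x 3 = x / 3 := PySem.Int.floordiv_eq_ediv_of_pos (by norm_num)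
  omega

-- ===== PORT A =====
-- the while-loop of A, state (total_fuel, fuel_needed); int(x/3) = PySem.Int.truncdiv x 3 (exact, |mass| ≤ 2^31 < 2^53)
def pvLoopA (total_fuel fuel_needed : Int) : Int :=
  let f := PySem.Int.truncdiv fuel_needed 3 - 2
  if f ≤ 0 then total_fuel else pvLoopA (total_fuel + f) f
termination_by fuel_needed.toNat
decreasing_by exact pvFuelTdiv_lt fuel_needed (by omega)

def calculate_consumption_realistic (mass : Int) : Int := pvLoopA 0 mass

-- ===== PORT B =====
def calculate_consumption_realistic_alt (mass : Int) : Int :=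
  let fuel := PySem.Int.floordiv mass 3 - 2
  if fuel ≤ 0 then 0 else fuel + calculate_consumption_realistic_alt fuel
termination_by mass.toNat
decreasing_by exact pvFuelFloordiv_lt mass (by omega)

-- ===== PRECONDITION & SPEC =====
def Spec_calculate_consumption_realistic (mass : Int) (out : Int) : Prop := out = calculate_consumption_realistic_alt mass
instance (mass : Int) (out : Int) : Decidable (Spec_calculate_consumption_realistic mass out) := by unfold Spec_calculate_consumption_realistic; infer_instance

-- ===== CLAIM (what is proved, stated in full; the proofs are below) =====
def Claim_equal_calculate_consumption_realistic : Prop := ∀ (mass : Int), Dom_calculate_consumption_realistic mass → Spec_calculate_consumption_realistic mass (calculate_consumption_realistic mass)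

-- ===== LEMMAS AND PROOFS =====

-- int(x/3) and x//3 give the same next fuel value whenever either is positive, and both are ≤ 0 together:
-- tdiv = ediv on nonnegative x, and on negative x both results are ≤ 0.
theorem pvStep_agree (x : Int) :
    (PySem.Int.truncdiv x 3 - 2 ≤ 0 ↔ PySem.Int.floordiv x 3 - 2 ≤ 0) ∧
    (0 < PySem.Int.truncdiv x 3 - 2 → PySem.Int.truncdiv x 3 = PySem.Int.floordiv x 3) := by
  have hf : PySem.Int.floordiv x 3 = x / 3 := PySem.Int.floordiv_eq_ediv_of_pos (by norm_num)
  unfold PySem.Int.truncdiv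
  rcases (by omega : x ≤ 0 ∨ 0 < x) with hx | hx
  · have h1 : x.tdiv 3 = -((-x).tdiv 3) := by rw [Int.neg_tdiv, neg_neg]
    have h2 : (-x).tdiv 3 = (-x) / 3 := Int.tdiv_eq_ediv_of_nonneg (by omega)
    omega
  · have h2 : x.tdiv 3 = x / 3 := Int.tdiv_eq_ediv_of_nonneg (by omega)
    omega

-- loop invariant: the accumulator splits off additively, so A's loop equals total + B's recursion
theorem pvLoopA_eq_alt (total fuel : Int) :
    pvLoopA total fuel = total + calculate_consumption_realistic_alt fuel := by
  rw [pvLoopA, calculate_consumption_realistic_alt]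
  obtain ⟨hiff, heq⟩ := pvStep_agree fuel
  by_cases h : PySem.Int.truncdiv fuel 3 - 2 ≤ 0
  · simp only [h, hiff.mp h, if_true]
    ring
  · have h' : ¬ (PySem.Int.floordiv fuel 3 - 2 ≤ 0) := fun hc => h (hiff.mpr hc)
    simp only [h, h', if_false]
    rw [pvLoopA_eq_alt, heq (by omega)]
    ring
termination_by fuel.toNat
decreasing_by exact pvFuelTdiv_lt fuel (by omega)

-- ===== VERDICT (by name: the statement is the Claim_ definition above) =====
theorem calculate_consumption_realistic_spec : Claim_equal_calculate_consumption_realistic := by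
  intro mass _
  unfold Spec_calculate_consumption_realistic calculate_consumption_realistic
  rw [pvLoopA_eq_alt]
  ring
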